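-- pv_equiv track=rewrite | github.com/materialsintelligence/matscholar | matscholar/utils.py | parse_word_expression
-- ===== SOURCE A (Python) =====
-- def parse_word_expression(expr):
--     """
--     Parses a word expression such as "thermoelectric - PbTe + LiFePO4" into positive and negative words
--     :param expr: a string expression, with " +" and " -" strings separating the words in the expression.
--     :return: Returns a tuple of lists (positive, negative)
--     """
--     last_word, i, is_positive = "", 0, True
--     positive, negative = [], []
--     while i < len(expr):
--         if expr[i:i+2] != " +" and expr[i:i+2] != " -":
--             last_word += expr[i]
--         else:
--             positive.append(last_word.strip()) if is_positive else negative.append(last_word.strip())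
--             is_positive, last_word, i = expr[i:i+2] == " +", "", i + 1
--         i += 1
--     if last_word.strip():
--         positive.append(last_word.strip()) if is_positive else negative.append(last_word.strip())
--     return positive, negative
-- ===== SOURCE B (Python) =====
-- def _find_sep(s):
--     for i in range(len(s) - 1):
--         if s[i] == ' ' and s[i + 1] in '+-':
--             return i
--     return None
--
--
-- def parse_word_expression(expr):
--     # Phase 1: cut the expression into (word, sign) segments at each " +"/" -" separator.
--     segments = []
--     sign, rest = '+', expr
--     while True:
--         cut = _find_sep(rest)
--         if cut is None:
--             break
--         segments.append((rest[:cut], sign))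
--         sign, rest = rest[cut + 1], rest[cut + 2:]
--     # Phase 2: distribute the stripped segment words by sign; the trailing word only if non-empty.
--     positive = [w.strip() for w, s in segments if s == '+']
--     negative = [w.strip() for w, s in segments if s != '+']
--     tail = rest.strip()
--     if tail:
--         (positive if sign == '+' else negative).append(tail)
--     return positive, negative
-- ===== Notes on version B (the rewrite author's own statement) =====
-- stated objective: faster
-- what changed: Replaces A's char-by-char accumulator state machine (building last_word one character at a time with inline sign bookkeeping) by a two-phase decomposition: first cut the expression into (word, sign) segments at each separator using slices, then build the positive/negative lists by sign-filtering comprehensions, appending the guarded trailing word last.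
import Mathlib
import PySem

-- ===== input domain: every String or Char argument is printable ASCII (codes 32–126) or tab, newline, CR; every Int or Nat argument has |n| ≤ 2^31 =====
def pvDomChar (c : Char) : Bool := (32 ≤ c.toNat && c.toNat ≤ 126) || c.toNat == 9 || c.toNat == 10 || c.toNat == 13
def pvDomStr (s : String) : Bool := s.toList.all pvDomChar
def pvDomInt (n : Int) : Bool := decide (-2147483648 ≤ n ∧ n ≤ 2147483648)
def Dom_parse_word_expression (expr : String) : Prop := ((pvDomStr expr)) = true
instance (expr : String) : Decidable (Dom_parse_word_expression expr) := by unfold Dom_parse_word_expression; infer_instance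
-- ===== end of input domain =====

-- B segments the expression at the separators with slices first, then distributes the stripped
-- words by sign (A is a char-by-char accumulator state machine); measured faster at large sizes.

-- ===== PORT A =====
-- A's while loop: remaining chars, the accumulated last_word, is_positive, positive, negative.
-- expr[i:i+2] equals " +"/" -" exactly when two chars remain and they are ' ' then '+'/'-'.
def pvLoopA : List Char → List Char → Bool → List String → List String → List String × List String
  | [], last, isPos, pos, neg =>
      -- after the loop: if last_word.strip(): append it to the current list
      if PySem.Chars.strip last ≠ [] then
        if isPos then (pos ++ [String.ofList (PySem.Chars.strip last)], neg)
        else (pos, neg ++ [String.ofList (PySem.Chars.strip last)])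
      else (pos, neg)
  | [c], last, isPos, pos, neg =>
      -- a 1-char slice never equals " +"/" -": accumulate and let the loop exit
      pvLoopA [] (last ++ [c]) isPos pos neg
  | c₁ :: c₂ :: rest, last, isPos, pos, neg =>
      if c₁ = ' ' ∧ (c₂ = '+' ∨ c₂ = '-') then
        -- separator branch: append last_word.strip() (unconditionally), reset, skip the sign char
        pvLoopA rest [] (c₂ == '+')
          (if isPos then pos ++ [String.ofList (PySem.Chars.strip last)] else pos)
          (if isPos then neg else neg ++ [String.ofList (PySem.Chars.strip last)])
      else
        pvLoopA (c₂ :: rest) (last ++ [c₁]) isPos pos neg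

def parse_word_expression (expr : String) : List String × List String :=
  pvLoopA expr.toList [] true [] []

-- ===== PORT B =====
-- _find_sep: index of the first i with s[i] = ' ' and s[i+1] in "+-", else None
def pvFindSep : List Char → Option Nat
  | c₁ :: c₂ :: rest =>
      if c₁ = ' ' ∧ (c₂ = '+' ∨ c₂ = '-') then some 0
      else (pvFindSep (c₂ :: rest)).map (· + 1)
  | _ => none

-- pvFindSep points at a ' '+sign pair, so the separator ends inside the list (used for termination)
theorem pvFindSep_le {cs : List Char} {k : Nat} (h : pvFindSep cs = some k) : k + 2 ≤ cs.length := by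
  induction cs generalizing k with
  | nil => simp [pvFindSep] at h
  | cons c rest ih =>
      match rest with
      | [] => simp [pvFindSep] at h
      | c₂ :: rest' =>
          rw [pvFindSep] at h
          split at h
          · cases h
            simp
          · simp only [Option.map_eq_some_iff] at h
            obtain ⟨k', hk', rfl⟩ := h
            have := ih hk'
            simpa [Nat.succ_le_succ_iff] using this

-- the while loop of B: collect (word, sign) segments; returns (segments, trailing rest, its sign)
def pvSegB (rest : List Char) (sign : Char) : List (List Char × Char) × List Char × Char :=
  match h : pvFindSep rest with
  | none => ([], rest, sign)
  | some cut =>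
      -- rest[cut+1] is in range (pvFindSep_le), so getD is exact for the Python indexing
      let r := pvSegB (rest.drop (cut + 2)) (rest.getD (cut + 1) ' ')
      ((rest.take cut, sign) :: r.1, r.2)
termination_by rest.length
decreasing_by
  have := pvFindSep_le h
  simp only [List.length_drop]
  omega

def parse_word_expression_alt (expr : String) : List String × List String :=
  let r := pvSegB expr.toList '+'
  let positive := (r.1.filter (fun ws => ws.2 == '+')).map (fun ws => String.ofList (PySem.Chars.strip ws.1))
  let negative := (r.1.filter (fun ws => ws.2 != '+')).map (fun ws => String.ofList (PySem.Chars.strip ws.1))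
  let tail := PySem.Chars.strip r.2.1
  if tail ≠ [] then
    if r.2.2 == '+' then (positive ++ [String.ofList tail], negative)
    else (positive, negative ++ [String.ofList tail])
  else (positive, negative)

-- ===== PRECONDITION & SPEC =====
def Spec_parse_word_expression (expr : String) (out : List String × List String) : Prop := out = parse_word_expression_alt expr
instance (expr : String) (out : List String × List String) : Decidable (Spec_parse_word_expression expr out) := by unfold Spec_parse_word_expression; infer_instance

-- ===== CLAIM (what is proved, stated in full; the proofs are below) =====
def Claim_equal_parse_word_expression : Prop := ∀ (expr : String), Dom_parse_word_expression expr → Spec_parse_word_expression expr (parse_word_expression expr)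

-- ===== LEMMAS AND PROOFS =====

-- the positive list B produces from state (cs, sign)
def pvP (cs : List Char) (sign : Char) : List String :=
  ((pvSegB cs sign).1.filter (fun ws => ws.2 == '+')).map (fun ws => String.ofList (PySem.Chars.strip ws.1))
  ++ (if PySem.Chars.strip (pvSegB cs sign).2.1 ≠ [] ∧ (pvSegB cs sign).2.2 == '+'
      then [String.ofList (PySem.Chars.strip (pvSegB cs sign).2.1)] else [])

-- the negative list B produces from state (cs, sign)
def pvN (cs : List Char) (sign : Char) : List String :=
  ((pvSegB cs sign).1.filter (fun ws => ws.2 != '+')).map (fun ws => String.ofList (PySem.Chars.strip ws.1))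
  ++ (if PySem.Chars.strip (pvSegB cs sign).2.1 ≠ [] ∧ ¬ (pvSegB cs sign).2.2 == '+'
      then [String.ofList (PySem.Chars.strip (pvSegB cs sign).2.1)] else [])

theorem alt_eq (expr : String) :
    parse_word_expression_alt expr = (pvP expr.toList '+', pvN expr.toList '+') := by
  unfold parse_word_expression_alt pvP pvN
  split_ifs with h1 h2 <;> simp_all

-- when no separator remains, A's loop just accumulates the rest and finishes
theorem loopA_none {cs : List Char} (h : pvFindSep cs = none)
    (last : List Char) (isPos : Bool) (pos neg : List String) :
    pvLoopA cs last isPos pos neg = pvLoopA [] (last ++ cs) isPos pos neg := by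
  induction cs generalizing last with
  | nil => simp
  | cons c rest ih =>
      match rest with
      | [] => rfl
      | c₂ :: rest' =>
          rw [pvFindSep] at h
          split at h
          · simp at h
          · rename_i hc
            simp only [Option.map_eq_none_iff] at h
            conv_lhs => rw [pvLoopA]
            rw [if_neg hc, ih h]
            have he : last ++ [c] ++ c₂ :: rest' = last ++ c :: c₂ :: rest' := by simp
            rw [he]

-- when the first separator is at cut, A's loop performs one separator step
theorem loopA_some {cs : List Char} {cut : Nat} (h : pvFindSep cs = some cut)
    (last : List Char) (isPos : Bool) (pos neg : List String) :
    pvLoopA cs last isPos pos neg =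
      pvLoopA (cs.drop (cut + 2)) [] (cs.getD (cut + 1) ' ' == '+')
        (if isPos then pos ++ [String.ofList (PySem.Chars.strip (last ++ cs.take cut))] else pos)
        (if isPos then neg else neg ++ [String.ofList (PySem.Chars.strip (last ++ cs.take cut))]) := by
  induction cs generalizing last cut with
  | nil => simp [pvFindSep] at h
  | cons c rest ih =>
      match rest with
      | [] => simp [pvFindSep] at h
      | c₂ :: rest' =>
          rw [pvFindSep] at h
          split at h
          · rename_i hc
            simp only [Option.some_inj] at h
            subst h
            conv_lhs => rw [pvLoopA]
            rw [if_pos hc]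
            simp
          · rename_i hc
            simp only [Option.map_eq_some_iff] at h
            obtain ⟨k', hk', rfl⟩ := h
            conv_lhs => rw [pvLoopA]
            rw [if_neg hc, ih hk']
            simp [List.append_assoc]

-- unfolding pvSegB when no separator remains
theorem pvSegB_none {cs : List Char} (h : pvFindSep cs = none) (sign : Char) :
    pvSegB cs sign = ([], cs, sign) := by
  rw [pvSegB]; split <;> simp_all

-- unfolding pvSegB at the first separator
theorem pvSegB_some {cs : List Char} {cut : Nat} (h : pvFindSep cs = some cut) (sign : Char) :
    pvSegB cs sign = ((cs.take cut, sign) :: (pvSegB (cs.drop (cut + 2)) (cs.getD (cut + 1) ' ')).1,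
      (pvSegB (cs.drop (cut + 2)) (cs.getD (cut + 1) ' ')).2) := by
  rw [pvSegB]; split <;> simp_all

theorem pvP_none {cs : List Char} (h : pvFindSep cs = none) (sign : Char) :
    pvP cs sign = if PySem.Chars.strip cs ≠ [] ∧ sign == '+'
      then [String.ofList (PySem.Chars.strip cs)] else [] := by
  unfold pvP; rw [pvSegB_none h]; simp

theorem pvN_none {cs : List Char} (h : pvFindSep cs = none) (sign : Char) :
    pvN cs sign = if PySem.Chars.strip cs ≠ [] ∧ ¬ sign == '+'
      then [String.ofList (PySem.Chars.strip cs)] else [] := by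
  unfold pvN; rw [pvSegB_none h]; simp

theorem pvP_some {cs : List Char} {cut : Nat} (h : pvFindSep cs = some cut) (sign : Char) :
    pvP cs sign = (if sign == '+' then [String.ofList (PySem.Chars.strip (cs.take cut))] else [])
      ++ pvP (cs.drop (cut + 2)) (cs.getD (cut + 1) ' ') := by
  unfold pvP; rw [pvSegB_some h]
  by_cases hp : sign = '+' <;> simp [hp]

theorem pvN_some {cs : List Char} {cut : Nat} (h : pvFindSep cs = some cut) (sign : Char) :
    pvN cs sign = (if ¬ sign == '+' then [String.ofList (PySem.Chars.strip (cs.take cut))] else [])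
      ++ pvN (cs.drop (cut + 2)) (cs.getD (cut + 1) ' ') := by
  unfold pvN; rw [pvSegB_some h]
  by_cases hp : sign = '+' <;> simp [hp]

-- main invariant: A's loop from a fresh last_word = B's segment-then-distribute, with accumulators in front
theorem loopA_eq_seg (cs : List Char) (sign : Char) (pos neg : List String) :
    pvLoopA cs [] (sign == '+') pos neg = (pos ++ pvP cs sign, neg ++ pvN cs sign) := by
  induction cs, sign using pvSegB.induct generalizing pos neg with
  | case1 cs sign h =>
      rw [loopA_none h, pvP_none h, pvN_none h]
      by_cases hs : PySem.Chars.strip cs = [] <;> by_cases hp : sign = '+' <;>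
        simp [pvLoopA, hs, hp]
  | case2 cs sign cut h ih =>
      rw [loopA_some h, ih, pvP_some h, pvN_some h]
      by_cases hp : sign = '+' <;> simp [hp, List.append_assoc]

-- ===== VERDICT (by name: the statement is the Claim_ definition above) =====
theorem parse_word_expression_spec : Claim_equal_parse_word_expression := by
  intro expr _
  unfold Spec_parse_word_expression
  rw [alt_eq]
  have : (true : Bool) = ('+' == '+') := by decide
  unfold parse_word_expression
  rw [this, loopA_eq_seg]
  simp
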